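/-
  SEGMENT F2 OF `start_decoder` (0x11526a–0x115302 + the error stub 0x115319–0x115326 + loop 3985 0x115455–0x115492;
  stb_vorbis_fixed.c 3966–3989) SPLIT AT THE RETURNS OF ITS TWO FIRST `get_bits` CALLS AND AT THE HEAD OF LOOP 3985: the assertions at
  the three cut points, the claims of the four children, and the composition `SegF2.of_parts` (pure logic: `ReachVia.trans`,
  `ReachVia.loop`; no machine step).

      F2a  0x11526a–0x11528e (8 insns)     the test `i < f->floor_count` (check 0x115271), `get_bits(f, 16)`
                                           exits: AtR1 (`jle` 0x115280 taken: the floor loop is done), AtF2a (`cut190` = 0x115293)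
      F2b  0x115293–0x1152e4 + 0x115319–0x115326 (23 insns)
                                           `f->floor_types[i] = …` (check 0x1152a7), `> 1` → `error(f, 20)` → the epilogue, `== 0` → F3,
                                           `g = f->floor_config + i` (check 0x1152c4), `get_bits(f, 5)`
                                           exits: AtERR, AtF3, AtF2b (`cut191` = 0x1152e9)
      F2c  0x1152e9–0x115302 (7 insns)     `g->partitions = …` (check 0x1152ef), `j = 0`, `max_class = −1`
                                           exit: AtF2L (`loop18` = 0x11545c) with j = 0, mc = −1
      F2d  0x11545c–0x115492 + 0x115455–0x115459 (18 insns)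
                                           ONE ROUND of loop 3985: `j < g->partitions`?, `g->partition_class_list[j] = get_bits(f, 4)`
                                           (check 0x11547c), `max_class`, `++j`
                                           exits: AtF2L with j + 1 (the measure `32 − r12` smaller), AtF4 (`jle` 0x115462 taken)

  WHAT IS LIVE AT THE CUTS (c/vorbis_f_insns.txt): rbp = f and `[rsp + 18H]` = i everywhere (`FloorLoop.rbp`, `.cnt`). At 0x115293: eax
  (`mov ebx, eax`). At 0x1152e9: eax (`mov r12d, eax`), rbx = g (0x1152ec, 0x1152f4). At 0x11545c: rbx = g, r12d = j, r13d = max_class;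
  r14, r15 are written (0x115471, 0x115474) before they are read. Every assertion is the section's loop invariant `FloorLoop` AT THE
  CUT'S ADDRESS plus these registers and the clauses of `Floor4` collected so far: the children carry `FloorLoop` with the floor
  layer's carry lemma (Vorbis/Spec/StartDecoderFloor.lean) over the callee's windows / the word `floor_types[i]` / the element `g(i)`.

  The three exit lemmas `F2.atR1_of_loop`, `F2.atF3_of_loop`, `F2.atERR_of_loop` (pure; proved by the first worker of the unit) and
  `F2.atF4_of_loop`, `F2.atF2L_zero` close the exits once `FloorLoop` stands at the exit's address.
-/
import Vorbis.Spec.StartDecoderB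
namespace Vorbis.Spec.StartDecoder
open X86 X86.User Asan

/-- **Cut 0x115293 (`cut190`): the return of `get_bits(f, 16)`** (line 3967, before `mov ebx, eax`): the invariant of loop 3966 at this
address, `i < floor_count` (`jle` 0x115280 not taken: `floor_count` is a field of `*f` that the reader does not write), and rax = the
sixteen bits (`GetBitsPost.result`, the whole register). rbx, r12 – r15 are dead. -/
structure InF2a (u₀ : State) (g : Ghost) (i : Nat) (A5 : Arena) (A : Arena × List Obj) (v : State) : Prop where
  /-- the loop invariant, at the return address of the call at 0x11528e -/
  loop : FloorLoop u₀ g L.start_decoder.cut190 i A5 A v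
  /-- the loop's test: `i < floor_count` -/
  lt : (i : Int) < stb_vorbis.floor_count v.mem g.f
  /-- the value read: sixteen bits, in the whole of rax (read by `mov ebx, eax`; `bx` is stored and tested) -/
  rax : (v.reg .rax).toNat < 2 ^ 16

/-- `AtF2a i`: `InF2a` for some ghost arenas. -/
def AtF2a (u₀ : State) (g : Ghost) (i : Nat) (v : State) : Prop := ∃ A5 A, InF2a u₀ g i A5 A v

/-- **Cut 0x1152e9 (`cut191`): the return of `get_bits(f, 5)`** (line 3984, before `mov r12d, eax`): the loop invariant at this address,
`i < floor_count`, FL3(i) (`floor_types[i] = 1`: the word stored at 0x1152ac was neither `> 1` nor `0`), rbx = `g(i)` (0x1152c9 –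
0x1152d5; callee-saved over the call), and rax = the five bits. r12 – r15 are dead. -/
structure InF2b (u₀ : State) (g : Ghost) (i : Nat) (A5 : Arena) (A : Arena × List Obj) (v : State) : Prop where
  /-- the loop invariant, at the return address of the call at 0x1152e4 -/
  loop : FloorLoop u₀ g L.start_decoder.cut191 i A5 A v
  /-- the loop's test: `i < floor_count` -/
  lt : (i : Int) < stb_vorbis.floor_count v.mem g.f
  /-- FL3(i): `floor_types[i] = 1` -/
  FL3 : stb_vorbis.floor_types v.mem g.f i = 1
  /-- rbx = g = floor_config + 1596·i -/
  rbx : v.reg .rbx = addr (floorAt g v.mem i)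
  /-- the value read: five bits, in the whole of rax (read by `mov r12d, eax`; `r12b` is stored into `g->partitions`) -/
  rax : (v.reg .rax).toNat < 32

/-- `AtF2b i`: `InF2b` for some ghost arenas. -/
def AtF2b (u₀ : State) (g : Ghost) (i : Nat) (v : State) : Prop := ∃ A5 A, InF2b u₀ g i A5 A v

/-- **The head of loop 3985, 0x11545c (`loop18`)** (`for (j = 0; j < g->partitions; ++j)`; exit of F2c with `j = 0`, `mc = −1`; entry and
back-edge exit of F2d): the loop invariant of the floor section at this address, `i < floor_count`, FL3(i), rbx = `g(i)`, r12 = j (the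
whole register: `mov r12d, [rsp+24H]` and `add r12d, 1` zero-extend), r13d = `max_class = mc` (`mov r13d, 0xffffffff`;
`mov r13d, r15d`), FL4(i) (`partitions ≤ 31`: the byte stored at 0x1152f4 is a `get_bits(f, 5)`), `j ≤ partitions`, `−1 ≤ mc ≤ 15`, and
the transient `PclUpTo … j mc` of Vorbis/Floor.lean §6. At `j = partitions` these are the clauses of `Floor4`. r14, r15 are dead. -/
structure InF2L (u₀ : State) (g : Ghost) (i : Nat) (A5 : Arena) (A : Arena × List Obj) (j : Nat) (mc : Int) (v : State) :
    Prop where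
  /-- the loop invariant of the floor section, at the head of the partition-class loop -/
  loop : FloorLoop u₀ g L.start_decoder.loop18 i A5 A v
  /-- the floor loop's test: `i < floor_count` -/
  lt : (i : Int) < stb_vorbis.floor_count v.mem g.f
  /-- FL3(i): `floor_types[i] = 1` -/
  FL3 : stb_vorbis.floor_types v.mem g.f i = 1
  /-- rbx = g = floor_config + 1596·i -/
  rbx : v.reg .rbx = addr (floorAt g v.mem i)
  /-- r12 = j, the partition counter (zero-extended) -/
  r12 : v.reg .r12 = addr j
  /-- r13d = max_class (−1 before the first partition) -/
  r13 : v.reg .r13 = word32 mc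
  /-- FL4(i): `partitions ≤ 31` -/
  FL4 : Floor1.partitions v.mem (floorAt g v.mem i) ≤ 31
  /-- the counter is at most `partitions` -/
  j_le : j ≤ Floor1.partitions v.mem (floorAt g v.mem i)
  mc_lo : -1 ≤ mc
  mc_hi : mc ≤ 15
  /-- the classes of the partitions below `j` are `≤ 15` and `≤ mc` -/
  pcl : PclUpTo v.mem (floorAt g v.mem i) j mc

/-- `AtF2L i`: `InF2L` for some ghost arenas, counter and running maximum. -/
def AtF2L (u₀ : State) (g : Ghost) (i : Nat) (v : State) : Prop := ∃ A5 A j mc, InF2L u₀ g i A5 A j mc v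

/-- **Segment `start_decoder.F2a`** (0x11526a–0x11528e and the callee: the floor loop's test, `get_bits(f, 16)`): to SD.6 (R1) when the
loop is done, else to the return of the call. -/
def SegF2a (Lay : Layout) (μ : Microarch) (u₀ : State) : Prop :=
  ∀ (g : Ghost) (i : Nat) (v : State), AtF2 u₀ g i v → ReachVia Lay μ WayInv v (fun w => AtR1 u₀ g w ∨ AtF2a u₀ g i w)

/-- **Segment `start_decoder.F2b`** (0x115293–0x1152e4 + the stub 0x115319–0x115326 and the callees: the store of `floor_types[i]`,
`> 1` → `error(f, VORBIS_invalid_setup)` → the epilogue, `0` → F3, `g`, `get_bits(f, 5)`). -/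
def SegF2b (Lay : Layout) (μ : Microarch) (u₀ : State) : Prop :=
  ∀ (g : Ghost) (i : Nat) (v : State), AtF2a u₀ g i v →
    ReachVia Lay μ WayInv v (fun w => AtERR u₀ g w ∨ AtF3 u₀ g i w ∨ AtF2b u₀ g i w)

/-- **Segment `start_decoder.F2c`** (0x1152e9–0x115302: the store of `g->partitions`, `j = 0` from the literal 0 of `d[R+24H]`,
`max_class = −1`, the jump to the loop head). -/
def SegF2c (Lay : Layout) (μ : Microarch) (u₀ : State) : Prop :=
  ∀ (g : Ghost) (i : Nat) (v : State), AtF2b u₀ g i v → ReachVia Lay μ WayInv v (fun w => AtF2L u₀ g i w)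

/-- **Segment `start_decoder.F2d`** (ONE ROUND of loop 3985, 0x11545c–0x115492 + the back edge 0x115455–0x115459): from the loop head back
to the loop head WITH A SMALLER MEASURE `32 − r12` (`j` grows by one every round and `j ≤ partitions ≤ 31`), or, when
`partitions ≤ j`, to F4. The composition does the induction. -/
def SegF2d (Lay : Layout) (μ : Microarch) (u₀ : State) : Prop :=
  ∀ (g : Ghost) (i : Nat) (v : State), AtF2L u₀ g i v →
    ReachVia Lay μ WayInv v (fun w =>
      (AtF2L u₀ g i w ∧ 32 - (w.reg .r12).toNat < 32 - (v.reg .r12).toNat) ∨ AtF4 u₀ g i w)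

/-- **Segment F2 from its four parts**: F2a leaves to R1 or reaches `AtF2a`; F2b leaves to the epilogue / F3 or reaches `AtF2b`; F2c
reaches the head of loop 3985; the loop by `ReachVia.loop` with the measure `32 − r12` (F2d states the decrease) reaches F4. -/
theorem SegF2.of_parts {Lay : Layout} {μ : Microarch} {u₀ : State} (ha : SegF2a Lay μ u₀) (hb : SegF2b Lay μ u₀)
    (hc : SegF2c Lay μ u₀) (hd : SegF2d Lay μ u₀) : SegF2 Lay μ u₀ := by
  intro g i v hat
  -- the loop: from any state at its head to F4
  have hloop : ∀ s, AtF2L u₀ g i s → ReachVia Lay μ WayInv s (fun w => AtF4 u₀ g i w) := by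
    apply ReachVia.loop (fun s => 32 - (s.reg .r12).toNat)
    intro s hs
    refine (hd g i s hs).mono ?_
    intro w hw
    rcases hw with ⟨hl, hlt⟩ | h4
    · exact Or.inr ⟨hl, hlt⟩
    · exact Or.inl h4
  refine (ha g i v hat).trans ?_
  intro va hva
  rcases hva with hr1 | hf2a
  · exact ReachVia.done (Or.inl hr1)
  refine (hb g i va hf2a).trans ?_
  intro vb hvb
  rcases hvb with herr | hf3 | hf2b
  · exact ReachVia.done (Or.inr (Or.inr (Or.inr herr)))
  · exact ReachVia.done (Or.inr (Or.inl hf3))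
  refine (hc g i vb hf2b).trans ?_
  intro vc hvc
  exact (hloop vc hvc).mono (fun w hw => Or.inr (Or.inr (Or.inl hw)))

/-! ### The exits from the loop invariant at the exit's address (pure)

After the floor layer's carry lemma has put `FloorLoop` at the exit's address, these close the exit. The first three are the proved
lemmas of the unit's first worker (farm attempt start_decoder.F2.1). -/

namespace F2

/-- **The exit of loop 3966 is SD.6** (the exit 0x115280 → 0x1158f8 of F2a): the loop invariant at the address of R1 with
`floor_count ≤ i` is the entry assertion of segment R1 — `FloorsUpTo.done` gives FL1 – FL10, the record is committed to the current
arena (`Own.mono`, `FloorsOK.reblk`), `LflUpTo` with `1 ≤ i` is `LongestFloorlist`, Z10 / Z24 / ONE20 go on (`SDFrameConsts.next`). -/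
theorem atR1_of_loop {u₀ : State} {g : Ghost} {i : Nat} {A5 : Arena} {A : Arena × List Obj} {s : State}
    (h : FloorLoop u₀ g pc_R1 i A5 A s) (hge : stb_vorbis.floor_count s.mem g.f ≤ (i : Int)) : AtR1 u₀ g s := by
  have hfl1 := h.floors.FL1
  have hile := h.i_le
  have hi1 : 1 ≤ i := by omega
  have hup : ∀ B, A5.Blk B → A.1.Blk B := fun B hB => hB.mono h.mid.extc
  have hown5 : Own 5 A.1.Blk s.mem g.f := h.mid.own.mono hup
  have hfloors : FloorsOK A.1.Blk s.mem g.f := (h.floors.done hge).reblk (fun B _ hB => hB.1)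
  have hown6 : Own 6 A.1.Blk s.mem g.f :=
    ⟨fun _ => hown5.comment (by omega), fun _ => hown5.cb0 (by omega), fun _ => hown5.nonnull (by omega),
      fun _ => hown5.books (by omega), fun _ => hfloors, fun h7 => absurd h7 (by omega), fun h8 => absurd h8 (by omega)⟩
  have hlfl : LongestFloorlist s.mem g.f g.R := by
    refine ⟨h.lfl.two hi1, h.lfl.hi, ?_⟩
    intro i' hi'
    exact h.lfl.ge i' (by omega)
  refine ⟨A, h.frame, h.hand, ?_, h.rbp⟩
  exact
    { env := h.mid.env
      consts := h.mid.consts.next (by omega) (by omega)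
      arena := h.mid.arena
      noTemps := h.mid.noTemps
      extc := Arena.Extends.refl _
      bits := h.mid.bits
      first := h.mid.first
      discard0 := h.mid.discard0
      header := h.mid.header
      own := hown6
      lfl := fun _ _ => hlfl
      mode := fun h9 => absurd h9 (by omega)
      rest := h.mid.rest }

/-- **The exit 0x1152bb → 0x11532b of F2b (a floor of type 0)**: the loop invariant at the address of F3 with `i < floor_count` IS the
entry assertion of segment F3. -/
theorem atF3_of_loop {u₀ : State} {g : Ghost} {i : Nat} {A5 : Arena} {A : Arena × List Obj} {s : State}
    (h : FloorLoop u₀ g pc_F3 i A5 A s) (hlt : (i : Int) < stb_vorbis.floor_count s.mem g.f) : AtF3 u₀ g i s :=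
  ⟨A5, A, h, hlt⟩

/-- **An error exit of the floor section** (F2b's 0x115326 → 0x113b22: `error(f, VORBIS_invalid_setup)` returned 0): the loop invariant
at the epilogue's address with eax = 0 is `AtERR` — SD.ERR by `Mid.failed`, H2 / H3 / H5 from the zero rest (the residue and mapping
sections have not started). Nothing of it is specific to F2: the error exits of F3, F4 and F6 close the same way. -/
theorem atERR_of_loop {u₀ : State} {g : Ghost} {i : Nat} {A5 : Arena} {A : Arena × List Obj} {s : State}
    (h : FloorLoop u₀ g pc_ERR i A5 A s) (hrax : (s.reg .rax).toNat % 2 ^ 32 = 0) : AtERR u₀ g s :=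
  ⟨A, h.frame, h.hand, Or.inl ⟨hrax,
    h.mid.failed (by omega) (h.mid.h2_null (by omega) _) (h.mid.h3_null (by omega) _) (h.mid.h5_null (by omega) _)⟩⟩

/-- **F2c's exit: the head of loop 3985 with `j = 0`, `max_class = −1`**: the loop invariant at `loop18`, the registers as the three
instructions 0x1152f7 – 0x115302 leave them, and `partitions ≤ 31` (the byte just stored); `PclUpTo.zero`. -/
theorem atF2L_zero {u₀ : State} {g : Ghost} {i : Nat} {A5 : Arena} {A : Arena × List Obj} {s : State}
    (h : FloorLoop u₀ g L.start_decoder.loop18 i A5 A s) (hlt : (i : Int) < stb_vorbis.floor_count s.mem g.f)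
    (hFL3 : stb_vorbis.floor_types s.mem g.f i = 1) (hrbx : s.reg .rbx = addr (floorAt g s.mem i))
    (hr12 : s.reg .r12 = addr 0) (hr13 : s.reg .r13 = word32 (-1))
    (hFL4 : Floor1.partitions s.mem (floorAt g s.mem i) ≤ 31) : AtF2L u₀ g i s :=
  ⟨A5, A, 0, -1,
    { loop := h
      lt := hlt
      FL3 := hFL3
      rbx := hrbx
      r12 := hr12
      r13 := hr13
      FL4 := hFL4
      j_le := Nat.zero_le _
      mc_lo := Int.le_refl _
      mc_hi := by omega
      pcl := PclUpTo.zero _ _ _ }⟩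

/-- **F2d's exit 0x115462 → 0x115494 (the partition-class loop is done)**: the clauses of the loop head with `partitions ≤ j` (`jle`
taken), the loop invariant moved to the address of F4 (no store in between), are the entry assertion of segment F4: `Floor4` with
`PclUpTo … partitions mc`. -/
theorem atF4_of_loop {u₀ : State} {g : Ghost} {i : Nat} {A5 : Arena} {A : Arena × List Obj} {j : Nat} {mc : Int} {v s : State}
    (hv : InF2L u₀ g i A5 A j mc v) (h : FloorLoop u₀ g pc_F4 i A5 A s) (hmem : s.mem = v.mem)
    (hrbx : s.reg .rbx = v.reg .rbx) (hr13 : s.reg .r13 = v.reg .r13)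
    (hge : Floor1.partitions v.mem (floorAt g v.mem i) ≤ j) : AtF4 u₀ g i s := by
  have hj : j = Floor1.partitions v.mem (floorAt g v.mem i) := Nat.le_antisymm hv.j_le hge
  refine ⟨A5, A, mc, h, ?_, ?_, ?_⟩
  · rw [hrbx, hmem]
    exact hv.rbx
  · rw [hr13]
    exact hv.r13
  · rw [hmem]
    refine ⟨hv.lt, hv.FL3, hv.FL4, hv.mc_lo, hv.mc_hi, ?_⟩
    rw [← hj]
    exact hv.pcl

end F2

end Vorbis.Spec.StartDecoder
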